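-- pv_equiv track=rewrite | github.com/Walter-Feng/myModule | band/__init__.py | split_array_heal
-- ===== SOURCE A (Python) =====
-- def split_array_heal(array):
--     INIT_FLAG = False
--     result = []
--
--     for i in array:
--         if INIT_FLAG:
--             i.insert(0,mem[-1])
--             result.append(i)
--         INIT_FLAG = True
--         mem = i
--
--     return result
-- ===== SOURCE B (Python) =====
-- def split_array_heal(array):
--     # Two-stage algorithm: first compute, from the ORIGINAL rows only, the value
--     # that must be prepended to each subsequent row (a scan: a row's last element,
--     # or the previous carry if the row is empty); then prepend in a second pass.
--     # Mutates the sublists in place exactly as A does.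
--     rows = list(array)
--     if len(rows) < 2:
--         return []
--     carries = []
--     c = rows[0][-1]
--     for row in rows[1:]:
--         carries.append(c)
--         c = row[-1] if row else c
--     out = []
--     for row, c in zip(rows[1:], carries):
--         row.insert(0, c)
--         out.append(row)
--     return out
-- ===== Notes on version B (the rewrite author's own statement) =====
-- stated objective: alternative
-- what changed: Replaced A's single stateful pass that reads the previously-mutated row (INIT_FLAG/mem) with a two-stage algorithm: a first scan over the original, unmutated rows computes all prepend values (propagating the carry across empty rows), and a second pass zips them onto the tail rows; no mutated data is ever read.
import Mathlib
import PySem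

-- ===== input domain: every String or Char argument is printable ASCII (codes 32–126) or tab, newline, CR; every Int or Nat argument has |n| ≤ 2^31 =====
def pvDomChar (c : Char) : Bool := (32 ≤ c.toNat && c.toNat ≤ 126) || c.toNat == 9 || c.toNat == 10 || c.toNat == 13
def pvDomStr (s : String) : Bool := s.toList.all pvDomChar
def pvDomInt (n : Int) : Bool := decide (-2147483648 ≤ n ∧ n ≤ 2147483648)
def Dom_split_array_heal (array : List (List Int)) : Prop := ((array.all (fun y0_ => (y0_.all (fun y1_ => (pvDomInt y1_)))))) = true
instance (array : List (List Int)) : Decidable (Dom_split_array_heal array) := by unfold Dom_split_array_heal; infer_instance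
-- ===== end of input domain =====

-- B replaces A's stateful pass (which reads the previously-MUTATED row via mem[-1]) by a
-- two-stage algorithm: a scan over the original rows precomputes all prepend values, then a
-- second pass zips them onto the tail rows. Both Pythons mutate the sublists in place
-- identically; the equivalence proved here is about the return value.

-- ===== PORT A =====
-- loop body over state (INIT_FLAG, mem, result); mem[-1] ported as getLast?.getD 0
-- (the IndexError case is excluded by Pre_)
def stepA (st : Bool × List Int × List (List Int)) (i : List Int) :
    Bool × List Int × List (List Int) :=
  if st.1 then
    let i' := (st.2.1.getLast?.getD 0) :: i   -- i.insert(0, mem[-1]) (in-place in Python)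
    (true, i', st.2.2 ++ [i'])
  else
    (true, i, st.2.2)

def split_array_heal (array : List (List Int)) : List (List Int) :=
  (array.foldl stepA (false, [], [])).2.2

-- ===== PORT B =====
-- stage-1 loop body: state (carries, c); c = row[-1] if row else c
def stepB (st : List Int × Int) (row : List Int) : List Int × Int :=
  (st.1 ++ [st.2], if row.isEmpty then st.2 else row.getLast?.getD 0)

def split_array_heal_alt (array : List (List Int)) : List (List Int) :=
  if array.length < 2 then []
  else
    match array with
    | [] => []
    | first :: rest =>
      let carries := (rest.foldl stepB ([], first.getLast?.getD 0)).1  -- rows[0][-1]; Pre_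
      (rest.zip carries).map (fun p => p.2 :: p.1)   -- row.insert(0, c); out.append(row)

-- ===== PRECONDITION & SPEC =====
-- Pre_ excludes exactly the inputs where Python raises IndexError: an empty FIRST row while a
-- second row exists (A's mem[-1] / B's rows[0][-1]); both Pythons raise there.
def Pre_split_array_heal (array : List (List Int)) : Prop :=
  array.length < 2 ∨ array.headI ≠ []
instance (array : List (List Int)) : Decidable (Pre_split_array_heal array) := by
  unfold Pre_split_array_heal; infer_instance
def pvWitness_split_array_heal : List (List Int) := [[1, 2], [3], [], [4]]
def Spec_split_array_heal (array : List (List Int)) (out : List (List Int)) : Prop := out = split_array_heal_alt array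
instance (array : List (List Int)) (out : List (List Int)) : Decidable (Spec_split_array_heal array out) := by unfold Spec_split_array_heal; infer_instance

-- ===== CLAIM (what is proved, stated in full; the proofs are below) =====
def Claim_equal_split_array_heal : Prop := ∀ (array : List (List Int)), Dom_split_array_heal array → Pre_split_array_heal array → Spec_split_array_heal array (split_array_heal array)

-- ===== LEMMAS AND PROOFS =====

-- recursive characterisation of B's stage-1 carries
def carriesRec (c : Int) : List (List Int) → List Int
  | [] => []
  | r :: rs => c :: carriesRec (if r.isEmpty then c else r.getLast?.getD 0) rs

theorem carries_foldl_eq (rest : List (List Int)) :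
    ∀ (c : Int) (acc : List Int),
    (rest.foldl stepB (acc, c)).1 = acc ++ carriesRec c rest := by
  induction rest with
  | nil => intro c acc; simp [carriesRec]
  | cons r rs ih =>
    intro c acc
    rw [List.foldl_cons]
    show (rs.foldl stepB (acc ++ [c], if r.isEmpty then c else r.getLast?.getD 0)).1 = _
    rw [ih]
    simp [carriesRec]

theorem getLast_cons_getD (c : Int) (i : List Int) :
    (c :: i).getLast?.getD 0 = if i.isEmpty then c else i.getLast?.getD 0 := by
  cases i with
  | nil => rfl
  | cons x xs => simp [List.getLast?_cons_cons]

-- Invariant: once INIT_FLAG is set with previous row mem, A's remaining loop appends exactly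
-- the carriesRec values zipped onto the remaining rows.
theorem split_array_heal_loop_eq (rest : List (List Int)) :
    ∀ (mem : List Int) (acc : List (List Int)),
    (rest.foldl stepA (true, mem, acc)).2.2
    = acc ++ (rest.zip (carriesRec (mem.getLast?.getD 0) rest)).map (fun p => p.2 :: p.1) := by
  induction rest with
  | nil => intro mem acc; simp [carriesRec]
  | cons i rs ih =>
    intro mem acc
    rw [List.foldl_cons]
    show (rs.foldl stepA (true, (mem.getLast?.getD 0) :: i,
        acc ++ [(mem.getLast?.getD 0) :: i])).2.2 = _
    rw [ih, getLast_cons_getD]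
    simp [carriesRec]

-- ===== VERDICT (by name: the statement is the Claim_ definition above) =====
theorem split_array_heal_spec : Claim_equal_split_array_heal := by
  intro array _ _
  unfold Spec_split_array_heal split_array_heal split_array_heal_alt
  cases array with
  | nil => rfl
  | cons first rest =>
    cases rest with
    | nil => rfl
    | cons r rs =>
      rw [if_neg (by simp)]
      rw [List.foldl_cons]
      show ((r :: rs).foldl stepA (true, first, [])).2.2 = _
      rw [split_array_heal_loop_eq (r :: rs) first []]
      have h : (List.foldl stepB ([], first.getLast?.getD 0) (r :: rs)).1
          = carriesRec (first.getLast?.getD 0) (r :: rs) := by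
        rw [carries_foldl_eq]; rfl
      show _ = List.map (fun p => p.2 :: p.1)
        ((r :: rs).zip ((List.foldl stepB ([], first.getLast?.getD 0) (r :: rs)).1))
      rw [h]
      simp
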